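-- pv_equiv track=rewrite | github.com/CrowdStrike/tsv-data-analytics | python-packages/core/src/omigo_core/utils.py | __gen_comb7__
-- ===== SOURCE A (Python) =====
-- def __gen_comb7__(n):
--    result = []
--    for i7 in range(0, n-6):
--        for i6 in range(i7+1, n-5):
--            for i5 in range(i6+1, n-4):
--                for i4 in range(i5+1, n-3):
--                    for i3 in range(i4+1, n-2):
--                        for i2 in range(i3+1, n-1):
--                            for i1 in range(i2+1, n):
--                                result.append([i7, i6, i5, i4, i3, i2, i1])
--    return result
-- ===== SOURCE B (Python) =====
-- def __gen_comb7__(n):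
--     result = []
--     def combine(start, k, path):
--         if k == 0:
--             result.append(list(path))
--             return
--         for i in range(start, n - k + 1):
--             combine(i + 1, k - 1, path + [i])
--     combine(0, 7, [])
--     return result
-- ===== Notes on version B (the rewrite author's own statement) =====
-- stated objective: simpler
-- what changed: Replaces the seven hard-coded nested for-loops with a single recursive helper combine(start, k, path) over the remaining combination length, emitting a copy of the path when k reaches 0.
import Mathlib
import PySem

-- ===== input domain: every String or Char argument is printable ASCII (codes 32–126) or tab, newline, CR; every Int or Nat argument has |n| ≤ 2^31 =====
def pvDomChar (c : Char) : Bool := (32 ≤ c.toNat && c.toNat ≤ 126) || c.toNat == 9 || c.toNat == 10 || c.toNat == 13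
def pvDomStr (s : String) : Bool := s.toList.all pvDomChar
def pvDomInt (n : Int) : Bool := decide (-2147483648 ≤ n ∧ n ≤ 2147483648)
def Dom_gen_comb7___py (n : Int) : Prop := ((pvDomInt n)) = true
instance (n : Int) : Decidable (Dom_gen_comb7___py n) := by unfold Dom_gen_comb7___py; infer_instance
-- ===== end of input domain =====

-- B replaces A's seven hard-coded nested loops by one recursive helper over the remaining
-- combination length (objective: simpler); same return value for every n.
-- In both ports the growing `result` Python list is modelled as an Array (push = append),
-- converted to a List at the end; everything else is step-for-step.

-- ===== PORT A =====
-- literal transliteration of the seven nested for-loops, each appending to `result`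
def gen_comb7___py (n : Int) : List (List Int) :=
  ((PySem.List.pyRange 0 (n - 6) 1).foldl (fun r1 i7 =>
    (PySem.List.pyRange (i7 + 1) (n - 5) 1).foldl (fun r2 i6 =>
      (PySem.List.pyRange (i6 + 1) (n - 4) 1).foldl (fun r3 i5 =>
        (PySem.List.pyRange (i5 + 1) (n - 3) 1).foldl (fun r4 i4 =>
          (PySem.List.pyRange (i4 + 1) (n - 2) 1).foldl (fun r5 i3 =>
            (PySem.List.pyRange (i3 + 1) (n - 1) 1).foldl (fun r6 i2 =>
              (PySem.List.pyRange (i2 + 1) n 1).foldl (fun r7 i1 =>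
                r7.push [i7, i6, i5, i4, i3, i2, i1]) r6) r5) r4) r3) r2) r1)
    (#[] : Array (List Int))).toList

-- ===== PORT B =====
-- combine(start, k, path): append a copy of path to the shared result when k == 0, else
-- loop i over range(start, n - k + 1) and recurse with (i + 1, k - 1, path + [i])
def pvCombineArr (n : Int) : Nat → Int → List Int → Array (List Int) → Array (List Int)
  | 0, _, path, res => res.push path
  | k + 1, start, path, res =>
      (PySem.List.pyRange start (n - (k + 1) + 1) 1).foldl
        (fun res i => pvCombineArr n k (i + 1) (path ++ [i]) res) res

def gen_comb7___py_alt (n : Int) : List (List Int) := (pvCombineArr n 7 0 [] #[]).toList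

-- ===== PRECONDITION & SPEC =====
def Spec_gen_comb7___py (n : Int) (out : List (List Int)) : Prop := out = gen_comb7___py_alt n
instance (n : Int) (out : List (List Int)) : Decidable (Spec_gen_comb7___py n out) := by unfold Spec_gen_comb7___py; infer_instance

-- ===== CLAIM (what is proved, stated in full; the proofs are below) =====
def Claim_equal_gen_comb7___py : Prop := ∀ (n : Int), Dom_gen_comb7___py n → Spec_gen_comb7___py n (gen_comb7___py n)

-- ===== LEMMAS AND PROOFS =====

-- generic transport: an Array-accumulating fold whose step appends `h x` is, at the List
-- level, an appended flatMap
theorem pv_foldl_arr_flatMap {α β : Type} (g : Array α → β → Array α) (h : β → List α)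
    (hg : ∀ (a : Array α) (x : β), (g a x).toList = a.toList ++ h x) :
    ∀ (l : List β) (a : Array α), (l.foldl g a).toList = a.toList ++ l.flatMap h := by
  intro l
  induction l with
  | nil => intro a; simp
  | cons x xs ih => intro a; simp [List.foldl_cons, ih, hg, List.flatMap_cons]

-- the pure List-level recurrence of B, used only inside the proofs
def pvCombine (n : Int) : Nat → Int → List Int → List (List Int)
  | 0, _, path => [path]
  | k + 1, start, path =>
      (PySem.List.pyRange start (n - (k + 1) + 1) 1).flatMap
        (fun i => pvCombine n k (i + 1) (path ++ [i]))

theorem pvCombineArr_toList (n : Int) :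
    ∀ (k : Nat) (s : Int) (p : List Int) (res : Array (List Int)),
      (pvCombineArr n k s p res).toList = res.toList ++ pvCombine n k s p := by
  intro k
  induction k with
  | zero => intro s p res; simp [pvCombineArr, pvCombine]
  | succ k ih =>
      intro s p res
      simp only [pvCombineArr, pvCombine]
      exact pv_foldl_arr_flatMap _ _ (fun a i => ih (i + 1) (p ++ [i]) a) _ res

theorem pvC (n : Int) (k : Nat) (s : Int) (p : List Int) :
    pvCombine n (k + 1) s p =
      (PySem.List.pyRange s (n - (k + 1) + 1) 1).flatMap
        (fun i => pvCombine n k (i + 1) (p ++ [i])) := rfl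

theorem pvC7 (n s : Int) (p : List Int) :
    pvCombine n 7 s p =
      (PySem.List.pyRange s (n - 6) 1).flatMap (fun i => pvCombine n 6 (i + 1) (p ++ [i])) := by
  rw [show (7 : Nat) = 6 + 1 from rfl, pvC, show n - ((6 : Nat) + 1 : Int) + 1 = n - 6 by push_cast; ring]

theorem pvC6 (n s : Int) (p : List Int) :
    pvCombine n 6 s p =
      (PySem.List.pyRange s (n - 5) 1).flatMap (fun i => pvCombine n 5 (i + 1) (p ++ [i])) := by
  rw [show (6 : Nat) = 5 + 1 from rfl, pvC, show n - ((5 : Nat) + 1 : Int) + 1 = n - 5 by push_cast; ring]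

theorem pvC5 (n s : Int) (p : List Int) :
    pvCombine n 5 s p =
      (PySem.List.pyRange s (n - 4) 1).flatMap (fun i => pvCombine n 4 (i + 1) (p ++ [i])) := by
  rw [show (5 : Nat) = 4 + 1 from rfl, pvC, show n - ((4 : Nat) + 1 : Int) + 1 = n - 4 by push_cast; ring]

theorem pvC4 (n s : Int) (p : List Int) :
    pvCombine n 4 s p =
      (PySem.List.pyRange s (n - 3) 1).flatMap (fun i => pvCombine n 3 (i + 1) (p ++ [i])) := by
  rw [show (4 : Nat) = 3 + 1 from rfl, pvC, show n - ((3 : Nat) + 1 : Int) + 1 = n - 3 by push_cast; ring]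

theorem pvC3 (n s : Int) (p : List Int) :
    pvCombine n 3 s p =
      (PySem.List.pyRange s (n - 2) 1).flatMap (fun i => pvCombine n 2 (i + 1) (p ++ [i])) := by
  rw [show (3 : Nat) = 2 + 1 from rfl, pvC, show n - ((2 : Nat) + 1 : Int) + 1 = n - 2 by push_cast; ring]

theorem pvC2 (n s : Int) (p : List Int) :
    pvCombine n 2 s p =
      (PySem.List.pyRange s (n - 1) 1).flatMap (fun i => pvCombine n 1 (i + 1) (p ++ [i])) := by
  rw [show (2 : Nat) = 1 + 1 from rfl, pvC, show n - ((1 : Nat) + 1 : Int) + 1 = n - 1 by push_cast; ring]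

theorem pvC1 (n s : Int) (p : List Int) :
    pvCombine n 1 s p =
      (PySem.List.pyRange s n 1).flatMap (fun i => [p ++ [i]]) := by
  rw [show (1 : Nat) = 0 + 1 from rfl, pvC, show n - ((0 : Nat) + 1 : Int) + 1 = n by push_cast; ring]
  simp [pvCombine]

theorem pvA1 (n i7 i6 i5 i4 i3 i2 : Int) (a : Array (List Int)) :
    ((PySem.List.pyRange (i2 + 1) n 1).foldl (fun r i1 => r.push [i7, i6, i5, i4, i3, i2, i1]) a).toList = a.toList ++ (PySem.List.pyRange (i2 + 1) n 1).flatMap (fun i1 => [[i7, i6, i5, i4, i3, i2, i1]]) :=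
  pv_foldl_arr_flatMap _ _ (fun a x => by simp) _ a

theorem pvA2 (n i7 i6 i5 i4 i3 : Int) (a : Array (List Int)) :
    ((PySem.List.pyRange (i3 + 1) (n - 1) 1).foldl (fun r i2 => (PySem.List.pyRange (i2 + 1) n 1).foldl (fun r i1 => r.push [i7, i6, i5, i4, i3, i2, i1]) r) a).toList = a.toList ++ (PySem.List.pyRange (i3 + 1) (n - 1) 1).flatMap (fun i2 => (PySem.List.pyRange (i2 + 1) n 1).flatMap (fun i1 => [[i7, i6, i5, i4, i3, i2, i1]])) :=
  pv_foldl_arr_flatMap _ _ (fun a i2 => pvA1 n i7 i6 i5 i4 i3 i2 a) _ a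

theorem pvA3 (n i7 i6 i5 i4 : Int) (a : Array (List Int)) :
    ((PySem.List.pyRange (i4 + 1) (n - 2) 1).foldl (fun r i3 => (PySem.List.pyRange (i3 + 1) (n - 1) 1).foldl (fun r i2 => (PySem.List.pyRange (i2 + 1) n 1).foldl (fun r i1 => r.push [i7, i6, i5, i4, i3, i2, i1]) r) r) a).toList = a.toList ++ (PySem.List.pyRange (i4 + 1) (n - 2) 1).flatMap (fun i3 => (PySem.List.pyRange (i3 + 1) (n - 1) 1).flatMap (fun i2 => (PySem.List.pyRange (i2 + 1) n 1).flatMap (fun i1 => [[i7, i6, i5, i4, i3, i2, i1]]))) :=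
  pv_foldl_arr_flatMap _ _ (fun a i3 => pvA2 n i7 i6 i5 i4 i3 a) _ a

theorem pvA4 (n i7 i6 i5 : Int) (a : Array (List Int)) :
    ((PySem.List.pyRange (i5 + 1) (n - 3) 1).foldl (fun r i4 => (PySem.List.pyRange (i4 + 1) (n - 2) 1).foldl (fun r i3 => (PySem.List.pyRange (i3 + 1) (n - 1) 1).foldl (fun r i2 => (PySem.List.pyRange (i2 + 1) n 1).foldl (fun r i1 => r.push [i7, i6, i5, i4, i3, i2, i1]) r) r) r) a).toList = a.toList ++ (PySem.List.pyRange (i5 + 1) (n - 3) 1).flatMap (fun i4 => (PySem.List.pyRange (i4 + 1) (n - 2) 1).flatMap (fun i3 => (PySem.List.pyRange (i3 + 1) (n - 1) 1).flatMap (fun i2 => (PySem.List.pyRange (i2 + 1) n 1).flatMap (fun i1 => [[i7, i6, i5, i4, i3, i2, i1]])))) :=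
  pv_foldl_arr_flatMap _ _ (fun a i4 => pvA3 n i7 i6 i5 i4 a) _ a

theorem pvA5 (n i7 i6 : Int) (a : Array (List Int)) :
    ((PySem.List.pyRange (i6 + 1) (n - 4) 1).foldl (fun r i5 => (PySem.List.pyRange (i5 + 1) (n - 3) 1).foldl (fun r i4 => (PySem.List.pyRange (i4 + 1) (n - 2) 1).foldl (fun r i3 => (PySem.List.pyRange (i3 + 1) (n - 1) 1).foldl (fun r i2 => (PySem.List.pyRange (i2 + 1) n 1).foldl (fun r i1 => r.push [i7, i6, i5, i4, i3, i2, i1]) r) r) r) r) a).toList = a.toList ++ (PySem.List.pyRange (i6 + 1) (n - 4) 1).flatMap (fun i5 => (PySem.List.pyRange (i5 + 1) (n - 3) 1).flatMap (fun i4 => (PySem.List.pyRange (i4 + 1) (n - 2) 1).flatMap (fun i3 => (PySem.List.pyRange (i3 + 1) (n - 1) 1).flatMap (fun i2 => (PySem.List.pyRange (i2 + 1) n 1).flatMap (fun i1 => [[i7, i6, i5, i4, i3, i2, i1]]))))) :=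
  pv_foldl_arr_flatMap _ _ (fun a i5 => pvA4 n i7 i6 i5 a) _ a

theorem pvA6 (n i7 : Int) (a : Array (List Int)) :
    ((PySem.List.pyRange (i7 + 1) (n - 5) 1).foldl (fun r i6 => (PySem.List.pyRange (i6 + 1) (n - 4) 1).foldl (fun r i5 => (PySem.List.pyRange (i5 + 1) (n - 3) 1).foldl (fun r i4 => (PySem.List.pyRange (i4 + 1) (n - 2) 1).foldl (fun r i3 => (PySem.List.pyRange (i3 + 1) (n - 1) 1).foldl (fun r i2 => (PySem.List.pyRange (i2 + 1) n 1).foldl (fun r i1 => r.push [i7, i6, i5, i4, i3, i2, i1]) r) r) r) r) r) a).toList = a.toList ++ (PySem.List.pyRange (i7 + 1) (n - 5) 1).flatMap (fun i6 => (PySem.List.pyRange (i6 + 1) (n - 4) 1).flatMap (fun i5 => (PySem.List.pyRange (i5 + 1) (n - 3) 1).flatMap (fun i4 => (PySem.List.pyRange (i4 + 1) (n - 2) 1).flatMap (fun i3 => (PySem.List.pyRange (i3 + 1) (n - 1) 1).flatMap (fun i2 => (PySem.List.pyRange (i2 + 1) n 1).flatMap (fun i1 => [[i7, i6, i5, i4,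 i3, i2, i1]])))))) :=
  pv_foldl_arr_flatMap _ _ (fun a i6 => pvA5 n i7 i6 a) _ a

theorem pvA7 (n : Int) (a : Array (List Int)) :
    ((PySem.List.pyRange 0 (n - 6) 1).foldl (fun r i7 => (PySem.List.pyRange (i7 + 1) (n - 5) 1).foldl (fun r i6 => (PySem.List.pyRange (i6 + 1) (n - 4) 1).foldl (fun r i5 => (PySem.List.pyRange (i5 + 1) (n - 3) 1).foldl (fun r i4 => (PySem.List.pyRange (i4 + 1) (n - 2) 1).foldl (fun r i3 => (PySem.List.pyRange (i3 + 1) (n - 1) 1).foldl (fun r i2 => (PySem.List.pyRange (i2 + 1) n 1).foldl (fun r i1 => r.push [i7, i6, i5, i4, i3, i2, i1]) r) r) r) r) r) r) a).toList = a.toList ++ (PySem.List.pyRange 0 (n - 6) 1).flatMap (fun i7 => (PySem.List.pyRange (i7 + 1) (n - 5) 1).flatMap (fun i6 => (PySem.List.pyRange (i6 + 1) (n - 4) 1).flatMap (fun i5 => (PySem.List.pyRange (i5 + 1) (n - 3) 1).flatMap (fun i4 => (PySem.List.pyRange (i4 + 1) (n - 2) 1).flatMap (fun i3 => (PySem.List.pyRange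 (i3 + 1) (n - 1) 1).flatMap (fun i2 => (PySem.List.pyRange (i2 + 1) n 1).flatMap (fun i1 => [[i7, i6, i5, i4, i3, i2, i1]]))))))) :=
  pv_foldl_arr_flatMap _ _ (fun a i7 => pvA6 n i7 a) _ a

-- port A, at the List level, is the same nested flatMap
theorem pvA_flat (n : Int) :
    gen_comb7___py n = (PySem.List.pyRange 0 (n - 6) 1).flatMap (fun i7 => (PySem.List.pyRange (i7 + 1) (n - 5) 1).flatMap (fun i6 => (PySem.List.pyRange (i6 + 1) (n - 4) 1).flatMap (fun i5 => (PySem.List.pyRange (i5 + 1) (n - 3) 1).flatMap (fun i4 => (PySem.List.pyRange (i4 + 1) (n - 2) 1).flatMap (fun i3 => (PySem.List.pyRange (i3 + 1) (n - 1) 1).flatMap (fun i2 => (PySem.List.pyRange (i2 + 1) n 1).flatMap (fun i1 => [[i7, i6, i5, i4, i3, i2, i1]]))))))) := by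
  unfold gen_comb7___py
  rw [pvA7 n #[]]
  simp

theorem gen_comb7___py_eq_alt (n : Int) : gen_comb7___py n = gen_comb7___py_alt n := by
  rw [pvA_flat, gen_comb7___py_alt, pvCombineArr_toList]
  simp only [pvC7, pvC6, pvC5, pvC4, pvC3, pvC2, pvC1]
  simp

-- ===== VERDICT (by name: the statement is the Claim_ definition above) =====
theorem gen_comb7___py_spec : Claim_equal_gen_comb7___py := by
  intro n _
  unfold Spec_gen_comb7___py
  exact gen_comb7___py_eq_alt n
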